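-- pv_equiv track=rewrite | github.com/jul-ienfr/P-core | python/src/weather_pm/account_learning.py | _abstention_signals
-- ===== SOURCE A (Python) =====
-- from collections import Counter, defaultdict
-- from typing import Any, Iterable
--
-- def _abstention_signals(rows: list[dict[str, Any]]) -> list[str]:
--     if not rows:
--         return ["no_public_weather_trades_in_backfill"]
--     signals: list[str] = []
--     if all(row.get("timing_bucket") == "historical_unknown" for row in rows):
--         signals.append("timing_unobservable_from_public_backfill")
--     if _counter(rows, "price_bucket").get("unknown") == len(rows):
--         signals.append("price_unobservable_from_public_backfill")
--     if len(rows) < 3: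
--         signals.append("sparse_public_weather_sample")
--     return signals
--
-- def _counter(rows: list[dict[str, Any]], key: str) -> dict[str, int]:
--     counts = Counter(str(row.get(key) or "unknown") for row in rows)
--     return dict(sorted(counts.items(), key=lambda item: (-item[1], item[0])))
-- ===== SOURCE B (Python) =====
-- def _abstention_signals(rows):
--     if not rows:
--         return ["no_public_weather_trades_in_backfill"]
--     all_historical = True
--     all_price_unknown = True
--     n = 0
--     for row in rows:
--         n += 1
--         if row.get("timing_bucket") != "historical_unknown":
--             all_historical = False
--         if str(row.get("price_bucket") or "unknown") != "unknown":
--             all_price_unknown = False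
--     signals = []
--     if all_historical:
--         signals.append("timing_unobservable_from_public_backfill")
--     if all_price_unknown:
--         signals.append("price_unobservable_from_public_backfill")
--     if n < 3:
--         signals.append("sparse_public_weather_sample")
--     return signals
-- ===== Notes on version B (the rewrite author's own statement) =====
-- stated objective: simpler
-- what changed: Replaced the Counter-build-sort-dict helper and the separate all() generator scan with one explicit loop over rows that maintains two booleans and a count, then emits the signals from those flags.
import Mathlib
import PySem

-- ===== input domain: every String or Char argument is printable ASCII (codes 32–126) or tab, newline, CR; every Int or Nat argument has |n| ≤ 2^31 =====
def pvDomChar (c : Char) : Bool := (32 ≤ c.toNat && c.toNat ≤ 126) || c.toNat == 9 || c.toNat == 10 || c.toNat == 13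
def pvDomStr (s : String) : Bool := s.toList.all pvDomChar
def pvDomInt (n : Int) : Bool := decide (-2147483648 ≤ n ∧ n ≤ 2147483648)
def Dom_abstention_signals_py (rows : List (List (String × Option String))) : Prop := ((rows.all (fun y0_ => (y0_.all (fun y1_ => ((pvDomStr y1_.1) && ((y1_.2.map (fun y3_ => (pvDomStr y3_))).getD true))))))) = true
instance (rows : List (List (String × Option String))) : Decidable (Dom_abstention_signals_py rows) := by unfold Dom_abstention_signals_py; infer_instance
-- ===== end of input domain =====

-- B replaces A's Counter/sort/dict helper and separate all() scan by one explicit loop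
-- maintaining two booleans and a count (objective: simpler).

-- row.get(k) for a dict whose values are Optional[str]: missing key and value None both give None
def pvRowGet (row : List (String × Option String)) (k : String) : Option String :=
  match (PySem.Dict.mk row).get? k with
  | some v => v
  | none => none

-- str(v or "unknown") for v : Optional[str] (falsy = None or "")
def pvNorm (v : Option String) : String :=
  match v with
  | none => "unknown"
  | some s => if s = "" then "unknown" else s

-- ===== PORT A =====
-- _counter(rows, key): Counter of the normalised values, sorted by (-count, key), back into a dict
def counter_py (rows : List (List (String × Option String))) (key : String) : PySem.Dict String Int :=
  let counts := PySem.Dict.counter (rows.map (fun row => pvNorm (pvRowGet row key)))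
  PySem.Dict.ofList (PySem.List.sorted2 counts.items (fun p => -p.2) (fun p => p.1) false)

def abstention_signals_py (rows : List (List (String × Option String))) : List String :=
  if rows = [] then ["no_public_weather_trades_in_backfill"]
  else
    let signals : List String := []
    let signals := if rows.all (fun row => pvRowGet row "timing_bucket" == some "historical_unknown")
      then signals ++ ["timing_unobservable_from_public_backfill"] else signals
    let signals := if (counter_py rows "price_bucket").get? "unknown" == some (rows.length : Int)
      then signals ++ ["price_unobservable_from_public_backfill"] else signals
    let signals := if rows.length < 3 then signals ++ ["sparse_public_weather_sample"] else signals
    signals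

-- ===== PORT B =====
def abstention_signals_py_alt (rows : List (List (String × Option String))) : List String :=
  if rows = [] then ["no_public_weather_trades_in_backfill"]
  else
    let st := rows.foldl (fun (st : Bool × Bool × Int) row =>
      (st.1 && (pvRowGet row "timing_bucket" == some "historical_unknown"),
       st.2.1 && (pvNorm (pvRowGet row "price_bucket") == "unknown"),
       st.2.2 + 1)) (true, true, (0 : Int))
    let signals : List String := []
    let signals := if st.1 then signals ++ ["timing_unobservable_from_public_backfill"] else signals
    let signals := if st.2.1 then signals ++ ["price_unobservable_from_public_backfill"] else signals
    let signals := if st.2.2 < 3 then signals ++ ["sparse_public_weather_sample"] else signals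
    signals

-- ===== PRECONDITION & SPEC =====
def Spec_abstention_signals_py (rows : List (List (String × Option String))) (out : List String) : Prop := out = abstention_signals_py_alt rows
instance (rows : List (List (String × Option String))) (out : List String) : Decidable (Spec_abstention_signals_py rows out) := by unfold Spec_abstention_signals_py; infer_instance

-- ===== CLAIM (what is proved, stated in full; the proofs are below) =====
def Claim_equal_abstention_signals_py : Prop := ∀ (rows : List (List (String × Option String))), Dom_abstention_signals_py rows → Spec_abstention_signals_py rows (abstention_signals_py rows)

-- ===== LEMMAS AND PROOFS =====

-- B's fold accumulates exactly: conjunction of the two row predicates and the row count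
theorem pv_fold_eq (rows : List (List (String × Option String))) (b1 b2 : Bool) (n : Int) :
    rows.foldl (fun (st : Bool × Bool × Int) row =>
      (st.1 && (pvRowGet row "timing_bucket" == some "historical_unknown"),
       st.2.1 && (pvNorm (pvRowGet row "price_bucket") == "unknown"),
       st.2.2 + 1)) (b1, b2, n)
    = (b1 && rows.all (fun row => pvRowGet row "timing_bucket" == some "historical_unknown"),
       b2 && rows.all (fun row => pvNorm (pvRowGet row "price_bucket") == "unknown"),
       n + rows.length) := by
  induction rows generalizing b1 b2 n with
  | nil => simp
  | cons r rs ih =>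
    simp only [List.foldl_cons, ih, List.all_cons, List.length_cons, Bool.and_assoc]
    refine Prod.ext rfl (Prod.ext rfl ?_)
    push_cast; ring

-- ofList of a list with distinct keys has exactly that items list
theorem pv_items_ofList {κ ν : Type} [BEq κ] [LawfulBEq κ] (l : List (κ × ν))
    (h : (l.map Prod.fst).Nodup) : (PySem.Dict.ofList l).items = l := by
  have := PySem.Dict.items_foldl_insert_fresh l Prod.fst Prod.snd PySem.Dict.empty
    (by intro a _; simp [PySem.Dict.contains_empty]) h
  simpa [PySem.Dict.ofList, PySem.Dict.update] using this

-- A's price condition, for nonempty rows, is B's "all rows normalise to unknown"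
theorem pv_price_eq (rows : List (List (String × Option String))) (h : rows ≠ []) :
    ((counter_py rows "price_bucket").get? "unknown" == some (rows.length : Int))
    = rows.all (fun row => pvNorm (pvRowGet row "price_bucket") == "unknown") := by
  set xs := rows.map (fun row => pvNorm (pvRowGet row "price_bucket")) with hxs
  have hperm := PySem.List.sorted2_perm (PySem.Dict.counter xs).items (fun p => -p.2) (fun p => p.1) false
  set l := PySem.List.sorted2 (PySem.Dict.counter xs).items (fun p => -p.2) (fun p => p.1) false with hl
  have hndd : ((PySem.Dict.counter xs).items.map Prod.fst).Nodup := by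
    have := PySem.Dict.nodup_keys_counter xs
    simpa [PySem.Dict.keys] using this
  have hndl : (l.map Prod.fst).Nodup := ((hperm.map Prod.fst).nodup_iff).mpr hndd
  have hitems : (PySem.Dict.ofList l).items = l := pv_items_ofList l hndl
  have hndk : (PySem.Dict.ofList l).keys.Nodup := by
    simpa [PySem.Dict.keys, hitems] using hndl
  have hcp : counter_py rows "price_bucket" = PySem.Dict.ofList l := rfl
  rw [hcp]
  have hall : rows.all (fun row => pvNorm (pvRowGet row "price_bucket") == "unknown")
      = xs.all (fun s => s == "unknown") := by
    simp [hxs, List.all_map, Function.comp_def]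
  rw [hall]
  have hlen : xs.length = rows.length := by simp [hxs]
  by_cases hmem : "unknown" ∈ xs
  · have hitem : ("unknown", (List.count "unknown" xs : Int)) ∈ (PySem.Dict.counter xs).items := by
      rw [PySem.Dict.items_counter]
      exact List.mem_map.mpr ⟨"unknown", by rwa [PySem.Set.mem_ofList], rfl⟩
    have hget : (PySem.Dict.ofList l).get? "unknown" = some (List.count "unknown" xs : Int) := by
      rw [PySem.Dict.get?_eq_some_iff_mem_items _ _ _ hndk, hitems]
      exact hperm.mem_iff.mpr hitem
    rw [hget, Bool.eq_iff_iff]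
    simp only [beq_iff_eq, Option.some.injEq, List.all_eq_true]
    constructor
    · intro hc b hb
      have hcnt : List.count "unknown" xs = xs.length := by
        rw [hlen]; exact_mod_cast hc
      exact (List.count_eq_length.mp hcnt b hb).symm
    · intro hb
      have hcnt : List.count "unknown" xs = xs.length :=
        List.count_eq_length.mpr (fun b h => (hb b h).symm)
      rw [← hlen]; exact_mod_cast hcnt
  · have hget : (PySem.Dict.ofList l).get? "unknown" = none := by
      rw [PySem.Dict.get?_eq_none_iff_not_mem_keys]
      intro hk
      apply hmem
      have hk' : "unknown" ∈ l.map Prod.fst := by simpa [PySem.Dict.keys, hitems] using hk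
      have hk2 : "unknown" ∈ (PySem.Dict.counter xs).items.map Prod.fst :=
        ((hperm.map Prod.fst).mem_iff).mp hk'
      have : "unknown" ∈ (PySem.Dict.counter xs).keys := by simpa [PySem.Dict.keys] using hk2
      rw [PySem.Dict.keys_counter] at this
      rwa [PySem.Set.mem_ofList] at this
    rw [hget, Bool.eq_iff_iff]
    simp only [List.all_eq_true, beq_iff_eq]
    constructor
    · intro hfalse; simp at hfalse
    · intro hb
      obtain ⟨r, hr⟩ := List.exists_mem_of_ne_nil rows h
      exact absurd (List.mem_map.mpr ⟨r, hr, (hb _ (List.mem_map.mpr ⟨r, hr, rfl⟩))⟩) hmem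

theorem pv_signals_eq (rows : List (List (String × Option String))) :
    abstention_signals_py rows = abstention_signals_py_alt rows := by
  by_cases h : rows = []
  · simp [abstention_signals_py, abstention_signals_py_alt, h]
  · simp only [abstention_signals_py, abstention_signals_py_alt, if_neg h,
      pv_fold_eq, Bool.true_and, pv_price_eq rows h]
    by_cases h3 : rows.length < 3
    · rw [if_pos h3, if_pos (show (0 : Int) + rows.length < 3 by omega)]
    · rw [if_neg h3, if_neg (show ¬((0 : Int) + rows.length < 3) by omega)]

-- ===== VERDICT (by name: the statement is the Claim_ definition above) =====
theorem abstention_signals_py_spec : Claim_equal_abstention_signals_py := by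
  intro rows _
  unfold Spec_abstention_signals_py
  exact pv_signals_eq rows
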